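-- pv_equiv track=rewrite | github.com/Sahara-Sheik/Robotic-Proprioception | src/demonstration/demopack.py | group_chooser_sp_bc_trivial
-- ===== SOURCE A (Python) =====
-- def group_chooser_sp_bc_trivial(demo_names):
--     """Copy all the data to sp, bc both training and testing. Note that this overlaps the training and testing so it is not a good idea in general."""
--     retval = {}
--     # the sensorprocessing data
--     for i, demo_name in enumerate(demo_names):
--         retval[f"sp_training_{i:05d}"] = demo_name
--     for i, demo_name in enumerate(demo_names):
--         retval[f"sp_validation_{i:05d}"] = demo_name
--     for i, demo_name in enumerate(demo_names):
--         retval[f"sp_testing_{i:05d}"] = demo_name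
--     # the behavior cloninng data
--     for i, demo_name in enumerate(demo_names):
--         retval[f"bc_training_{i:05d}"] = demo_name
--     for i, demo_name in enumerate(demo_names):
--         retval[f"bc_validation_{i:05d}"] = demo_name
--     for i, demo_name in enumerate(demo_names):
--         retval[f"bc_testing_{i:05d}"] = demo_name
--     return retval
-- ===== SOURCE B (Python) =====
-- _PREFIXES = ("sp_training", "sp_validation", "sp_testing",
--              "bc_training", "bc_validation", "bc_testing")
--
-- def group_chooser_sp_bc_trivial(demo_names):
--     """Copy all the data to sp, bc both training and testing. Note that this overlaps the training and testing so it is not a good idea in general."""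
--     n = len(demo_names)
--     return {f"{_PREFIXES[k // n]}_{k % n:05d}": demo_names[k % n]
--             for k in range(6 * n)}
-- ===== Notes on version B (the rewrite author's own statement) =====
-- stated objective: alternative
-- what changed: Replaces six hand-duplicated enumerate loops over the list with one flat dict comprehension over range(6*n), recovering the prefix and the item by divmod index arithmetic (prefix = table[k//n], item = demo_names[k%n]).
import Mathlib
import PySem

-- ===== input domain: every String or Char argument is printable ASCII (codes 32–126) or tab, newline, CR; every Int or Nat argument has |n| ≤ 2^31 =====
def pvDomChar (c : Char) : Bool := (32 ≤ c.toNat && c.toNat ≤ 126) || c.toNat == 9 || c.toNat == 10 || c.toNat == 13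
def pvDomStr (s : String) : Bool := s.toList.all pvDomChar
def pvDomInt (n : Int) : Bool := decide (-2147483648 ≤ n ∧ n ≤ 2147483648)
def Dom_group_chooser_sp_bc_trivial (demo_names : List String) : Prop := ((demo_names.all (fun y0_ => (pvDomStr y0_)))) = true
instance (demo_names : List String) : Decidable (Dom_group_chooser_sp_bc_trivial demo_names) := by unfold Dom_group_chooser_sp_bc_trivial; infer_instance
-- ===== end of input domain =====

-- B replaces A's six hand-duplicated enumerate loops with ONE flat loop over range(6*n),
-- recovering the prefix and the item by divmod index arithmetic (objective: alternative).

-- shared helper: Python's f"…{i:05d}" formatting (= str(i).zfill(5); both sources use the same format spec)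
def pad05 (i : Int) : String := PySem.Str.zfill (PySem.Int.toStr i) 5

-- ===== PORT A =====
def group_chooser_sp_bc_trivial (demo_names : List String) : List (String × String) :=
  let retval : PySem.Dict String String := PySem.Dict.empty
  let retval := (PySem.List.enumerate demo_names).foldl
    (fun d p => d.insert ("sp_training_" ++ pad05 p.1) p.2) retval
  let retval := (PySem.List.enumerate demo_names).foldl
    (fun d p => d.insert ("sp_validation_" ++ pad05 p.1) p.2) retval
  let retval := (PySem.List.enumerate demo_names).foldl
    (fun d p => d.insert ("sp_testing_" ++ pad05 p.1) p.2) retval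
  let retval := (PySem.List.enumerate demo_names).foldl
    (fun d p => d.insert ("bc_training_" ++ pad05 p.1) p.2) retval
  let retval := (PySem.List.enumerate demo_names).foldl
    (fun d p => d.insert ("bc_validation_" ++ pad05 p.1) p.2) retval
  let retval := (PySem.List.enumerate demo_names).foldl
    (fun d p => d.insert ("bc_testing_" ++ pad05 p.1) p.2) retval
  retval.items

-- ===== PORT B =====
def pvPrefixes : List String :=
  ["sp_training", "sp_validation", "sp_testing", "bc_training", "bc_validation", "bc_testing"]

-- one flat comprehension over range(6*n); k // n picks the prefix, k % n the item
-- (pyGetD with default "" only totalises the in-range indexings _PREFIXES[k//n], demo_names[k%n])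
def group_chooser_sp_bc_trivial_alt (demo_names : List String) : List (String × String) :=
  let n : Int := (demo_names.length : Int)
  ((PySem.List.pyRange 0 (6 * n) 1).foldl
    (fun d k =>
      d.insert ((PySem.List.pyGetD pvPrefixes (PySem.Int.floordiv k n) "" ++ "_")
                  ++ pad05 (PySem.Int.mod k n))
               (PySem.List.pyGetD demo_names (PySem.Int.mod k n) ""))
    PySem.Dict.empty).items

-- ===== PRECONDITION & SPEC =====
def Spec_group_chooser_sp_bc_trivial (demo_names : List String) (out : List (String × String)) : Prop := out = group_chooser_sp_bc_trivial_alt demo_names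
instance (demo_names : List String) (out : List (String × String)) : Decidable (Spec_group_chooser_sp_bc_trivial demo_names out) := by unfold Spec_group_chooser_sp_bc_trivial; infer_instance

-- ===== CLAIM (what is proved, stated in full; the proofs are below) =====
def Claim_equal_group_chooser_sp_bc_trivial : Prop := ∀ (demo_names : List String), Dom_group_chooser_sp_bc_trivial demo_names → Spec_group_chooser_sp_bc_trivial demo_names (group_chooser_sp_bc_trivial demo_names)

-- ===== LEMMAS AND PROOFS =====

-- one chunk [j*n, j*n+n) of B's flat range performs exactly A's j-th enumerate loop
theorem pv_chunk (demo_names : List String) (j a b : Int)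
    (ha : a = j * (demo_names.length : Int)) (hb : b = a + (demo_names.length : Int))
    (d : PySem.Dict String String) :
    (PySem.List.pyRange a b 1).foldl
      (fun d k =>
        d.insert ((PySem.List.pyGetD pvPrefixes (PySem.Int.floordiv k (demo_names.length : Int)) "" ++ "_")
                    ++ pad05 (PySem.Int.mod k (demo_names.length : Int)))
                 (PySem.List.pyGetD demo_names (PySem.Int.mod k (demo_names.length : Int)) "")) d
    = (PySem.List.enumerate demo_names).foldl
        (fun d p => d.insert ((PySem.List.pyGetD pvPrefixes j "" ++ "_") ++ pad05 p.1) p.2) d := by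
  set n : Int := (demo_names.length : Int) with hn
  have hlen : PySem.List.len demo_names = n := by simp [PySem.List.len_eq, hn]
  rw [PySem.List.enumerate_eq_map_pyRange demo_names ""]
  rw [hlen, PySem.List.pyRange_one a b, PySem.List.pyRange_one 0 n]
  have hba : (b - a).toNat = (n - 0).toNat := by omega
  rw [hba]
  simp only [List.foldl_map, zero_add]
  apply PySem.List.foldl_congr_mem
  intro acc k hk
  have hk' : (k : Int) < n := by
    have := List.mem_range.mp hk
    omega
  have hpos : 0 < n := by omega
  have hfd : PySem.Int.floordiv (a + (k : Int)) n = j := by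
    rw [PySem.Int.floordiv_eq_iff_of_pos hpos]
    have h1 : (j + 1) * n = j * n + n := by ring
    constructor
    · have : (0:Int) ≤ (k : Int) := by positivity
      omega
    · rw [h1]; omega
  have hmod : PySem.Int.mod (a + (k : Int)) n = (k : Int) := by
    have h := PySem.Int.floordiv_mul_add_mod (a + (k : Int)) n
    rw [hfd] at h
    omega
  simp [hfd, hmod]

-- ===== VERDICT (by name: the statement is the Claim_ definition above) =====
theorem group_chooser_sp_bc_trivial_spec : Claim_equal_group_chooser_sp_bc_trivial := by
  intro demo_names _
  unfold Spec_group_chooser_sp_bc_trivial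
  by_cases hnil : demo_names = []
  · subst hnil; rfl
  · have hpos : 0 < (demo_names.length : Int) := by
      simp [List.length_pos_iff, hnil]
    set n : Int := (demo_names.length : Int) with hn
    simp only [group_chooser_sp_bc_trivial, group_chooser_sp_bc_trivial_alt]
    rw [PySem.List.pyRange_one_append 0 n (6 * n) (by omega) (by omega),
        PySem.List.pyRange_one_append n (2 * n) (6 * n) (by omega) (by omega),
        PySem.List.pyRange_one_append (2 * n) (3 * n) (6 * n) (by omega) (by omega),
        PySem.List.pyRange_one_append (3 * n) (4 * n) (6 * n) (by omega) (by omega),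
        PySem.List.pyRange_one_append (4 * n) (5 * n) (6 * n) (by omega) (by omega)]
    rw [List.foldl_append, List.foldl_append, List.foldl_append, List.foldl_append,
        List.foldl_append]
    rw [pv_chunk demo_names 0 0 n (by omega) (by omega),
        pv_chunk demo_names 1 n (2 * n) (by omega) (by omega),
        pv_chunk demo_names 2 (2 * n) (3 * n) (by omega) (by omega),
        pv_chunk demo_names 3 (3 * n) (4 * n) (by omega) (by omega),
        pv_chunk demo_names 4 (4 * n) (5 * n) (by omega) (by omega),
        pv_chunk demo_names 5 (5 * n) (6 * n) (by omega) (by omega)]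
    simp only [show PySem.List.pyGetD pvPrefixes 0 "" = "sp_training" from rfl,
      show PySem.List.pyGetD pvPrefixes 1 "" = "sp_validation" from rfl,
      show PySem.List.pyGetD pvPrefixes 2 "" = "sp_testing" from rfl,
      show PySem.List.pyGetD pvPrefixes 3 "" = "bc_training" from rfl,
      show PySem.List.pyGetD pvPrefixes 4 "" = "bc_validation" from rfl,
      show PySem.List.pyGetD pvPrefixes 5 "" = "bc_testing" from rfl,
      show ("sp_training" ++ "_" : String) = "sp_training_" from rfl,
      show ("sp_validation" ++ "_" : String) = "sp_validation_" from rfl,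
      show ("sp_testing" ++ "_" : String) = "sp_testing_" from rfl,
      show ("bc_training" ++ "_" : String) = "bc_training_" from rfl,
      show ("bc_validation" ++ "_" : String) = "bc_validation_" from rfl,
      show ("bc_testing" ++ "_" : String) = "bc_testing_" from rfl]
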